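-- pv_equiv track=rewrite | github.com/queelius/computational-explorations | src/covering_systems.py | enumerate_covering_systems
-- ===== SOURCE A (Python) =====
-- import math
-- from typing import List, Tuple, Dict, Optional, Set
--
-- CoveringSystem = List[Tuple[int, int]]  # list of (residue, modulus) pairs
--
-- def _lcm_list(vals: List[int]) -> int:
--     """LCM of a list of positive integers."""
--     result = 1
--     for v in vals:
--         result = result * v // math.gcd(result, v)
--     return result
--
-- def enumerate_covering_systems(moduli: List[int], max_solutions: int = 100) -> List[CoveringSystem]:
--     """
--     Enumerate all covering systems using exactly the given moduli
--     (one residue class per modulus).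
--
--     Returns up to max_solutions valid covering systems.
--     """
--     if not moduli:
--         return []
--
--     L = _lcm_list(moduli)
--     solutions = []
--
--     def backtrack(idx: int, current: List[Tuple[int, int]], covered: Set[int]):
--         if idx == len(moduli):
--             if len(covered) == L:
--                 solutions.append(list(current))
--             return
--
--         if len(solutions) >= max_solutions:
--             return
--
--         m = moduli[idx]
--         for a in range(m):
--             new_covered = covered | {x for x in range(L) if x % m == a}
--             # Pruning: check if remaining moduli can possibly cover the gap
--             remaining_capacity = sum(L // moduli[j] for j in range(idx + 1, len(moduli)))
--             gap = L - len(new_covered)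
--             if remaining_capacity < gap:
--                 continue
--
--             current.append((a, m))
--             backtrack(idx + 1, current, new_covered)
--             current.pop()
--
--     backtrack(0, [], set())
--     return solutions
-- ===== SOURCE B (Python) =====
-- import math
--
-- def _assignments(front):
--     """Lazily yield every residue assignment [(a, m), ...] over the moduli in
--     `front`, in lexicographic order of the residues."""
--     if not front:
--         yield []
--         return
--     m = front[0]
--     for a in range(m):
--         for rest in _assignments(front[1:]):
--             yield [(a, m)] + rest
--
-- def enumerate_covering_systems(moduli, max_solutions=100):
--     """Staged brute force instead of pruned backtracking: stream every residue
--     assignment to all moduli but the last, and complete each one directly --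
--     the last residue class is forced by the leftover residues, so there is no
--     search, no incremental covered set and no pruning."""
--     if not moduli:
--         return []
--     if max_solutions <= 0:
--         return []
--     if any(m <= 0 for m in moduli):
--         return []          # no residue class exists for a nonpositive modulus
--     L = 1
--     for v in moduli:
--         L = L * v // math.gcd(L, v)
--     if sum(L // m for m in moduli) < L:
--         return []          # density bound: the classes cannot cover range(L)
--     front, last = moduli[:-1], moduli[-1]
--
--     sols = []
--     for p in _assignments(front):
--         if len(sols) >= max_solutions:
--             break
--         leftover = [x for x in range(L)
--                     if all(x % m != a for (a, m) in p)]
--         if last >= 1: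
--             if not leftover:
--                 sols.extend(p + [(a, last)] for a in range(last))
--             else:
--                 r = leftover[0] % last
--                 if all(x % last == r for x in leftover):
--                     sols.append(p + [(r, last)])
--     return sols
-- ===== Notes on version B (the rewrite author's own statement) =====
-- stated objective: alternative
-- what changed: B replaces A's recursive backtracking (incremental covered-set union over range(L) plus a capacity-vs-gap prune at every node) by a staged brute force: it materializes the full product of residue choices for all but the last modulus as a flat list, then scans that list once, recomputing each prefix's leftover residues from scratch and completing the prefix directly -- the last residue class is forced by the leftovers -- with no recursion, no incremental state and no pruning.
import Mathlib
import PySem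

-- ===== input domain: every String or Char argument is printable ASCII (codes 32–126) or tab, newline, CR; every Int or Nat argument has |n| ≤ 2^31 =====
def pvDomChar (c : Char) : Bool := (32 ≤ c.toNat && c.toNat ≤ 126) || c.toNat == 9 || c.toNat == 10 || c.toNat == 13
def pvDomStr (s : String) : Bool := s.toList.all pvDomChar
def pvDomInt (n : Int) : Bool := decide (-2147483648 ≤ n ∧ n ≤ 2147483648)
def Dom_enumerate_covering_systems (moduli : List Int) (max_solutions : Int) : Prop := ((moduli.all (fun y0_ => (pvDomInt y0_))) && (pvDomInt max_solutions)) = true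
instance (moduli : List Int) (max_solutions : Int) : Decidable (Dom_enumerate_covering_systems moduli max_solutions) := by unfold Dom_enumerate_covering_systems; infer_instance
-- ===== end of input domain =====

-- B replaces A's pruned recursive backtracking by a staged brute force: build the flat
-- product of residue choices for all but the last modulus, then scan it once, completing
-- each prefix directly (objective: alternative algorithm, same results).

-- ===== PORT A =====

-- _lcm_list: result = result * v // math.gcd(result, v)
def pvLcmList (vals : List Int) : Int :=
  vals.foldl (fun r v => PySem.Int.floordiv (r * v) ((Int.gcd r v : Int))) 1

-- Python set union: `covered` and the comprehension set are sets of ints ⊆ range(L); the port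
-- keeps each set as its strictly increasing list of elements (exact AS A SET; A consumes
-- `covered` only through len and union, which are order-independent), so s | t is a linear merge.
def pvMergeAux : List Int → List Int → List Int → List Int
  | acc, [], ys => acc.reverse ++ ys
  | acc, xs, [] => acc.reverse ++ xs
  | acc, x :: xs, y :: ys =>
      if x < y then pvMergeAux (x :: acc) xs (y :: ys)
      else if y < x then pvMergeAux (y :: acc) (x :: xs) ys
      else pvMergeAux (x :: acc) xs ys

def pvMerge (xs ys : List Int) : List Int := pvMergeAux [] xs ys

-- backtrack(idx, current, covered): structural recursion on the moduli suffix
-- (m = moduli[idx] is the head; the capacity generator over j in range(idx+1, len(moduli))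
-- reads exactly the elements of the tail).  The loop state is `solutions`; `current.append`
-- then `current.pop` around the recursive call become passing `current ++ [(a, m)]` to it.
def pvBacktrackA (L maxs : Int) :
    List Int → List (Int × Int) → PySem.Set Int → List (List (Int × Int)) → List (List (Int × Int))
  | [], current, covered, solutions =>
      if PySem.Set.len covered = L then solutions ++ [current] else solutions
  | m :: rest, current, covered, solutions =>
      if PySem.List.len solutions ≥ maxs then solutions
      else
        (PySem.List.pyRange 0 m 1).foldl (fun sols a =>
          let newCovered := pvMerge covered
            ((PySem.List.pyRange 0 L 1).filter (fun x => PySem.Int.mod x m == a))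
          let cap := rest.foldl (fun s mj => s + PySem.Int.floordiv L mj) 0
          let gap := L - PySem.Set.len newCovered
          if cap < gap then sols
          else pvBacktrackA L maxs rest (current ++ [(a, m)]) newCovered sols) solutions

def enumerate_covering_systems (moduli : List Int) (max_solutions : Int) : List (List (Int × Int)) :=
  if moduli = [] then []
  else pvBacktrackA (pvLcmList moduli) max_solutions moduli [] PySem.Set.empty []

-- ===== PORT B =====

-- _assignments(front): the recursive generator, as the list it yields, in yield order
def pvAssignments : List Int → List (List (Int × Int))
  | [] => [[]]
  | m :: fs => (PySem.List.pyRange 0 m 1).flatMap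
      (fun a => (pvAssignments fs).map (fun rest => (a, m) :: rest))

-- leftover = [x for x in range(L) if all(x % m != a for (a, m) in p)]
def pvLeftover (L : Int) (p : List (Int × Int)) : List Int :=
  (PySem.List.pyRange 0 L 1).filter (fun x => p.all (fun am => !(PySem.Int.mod x am.2 == am.1)))

-- one iteration of B's scan over the assignment stream (the `break` is the guard re-checked per step)
def pvStepB (L last maxs : Int) (sols : List (List (Int × Int))) (p : List (Int × Int)) :
    List (List (Int × Int)) :=
  if PySem.List.len sols ≥ maxs then sols
  else
    let leftover := pvLeftover L p
    if last ≥ 1 then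
      if leftover.isEmpty then
        sols ++ (PySem.List.pyRange 0 last 1).map (fun a => p ++ [(a, last)])
      else
        if leftover.all (fun x => PySem.Int.mod x last == PySem.Int.mod (leftover.headD 0) last) then
          sols ++ [p ++ [(PySem.Int.mod (leftover.headD 0) last, last)]]
        else sols
    else sols

-- moduli[:-1] / moduli[-1] on a nonempty list ported as dropLast / getLastD (exact there)
def enumerate_covering_systems_alt (moduli : List Int) (max_solutions : Int) : List (List (Int × Int)) :=
  if moduli = [] then []
  else if max_solutions ≤ 0 then []
  else if moduli.any (fun m => m ≤ 0) then []      -- no residue class for a nonpositive modulus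
  else
    let L := moduli.foldl (fun l v => PySem.Int.floordiv (l * v) ((Int.gcd l v : Int))) 1
    if (moduli.map (fun m => PySem.Int.floordiv L m)).sum < L then []   -- density bound
    else (pvAssignments moduli.dropLast).foldl (pvStepB L (moduli.getLastD 0) max_solutions) []

-- ===== PRECONDITION & SPEC =====
-- Pre_ excludes exactly the inputs on which A raises ZeroDivisionError: moduli containing two
-- zeros (gcd(0, 0) = 0 inside _lcm_list), and moduli whose first element is ≥ 1 with a 0 later
-- in the list when max_solutions ≥ 1 (the capacity sum divides by that 0).  A returns no value
-- on any excluded input.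
def Pre_enumerate_covering_systems (moduli : List Int) (max_solutions : Int) : Prop :=
  ¬ (2 ≤ moduli.count 0 ∨ (1 ≤ max_solutions ∧ 1 ≤ moduli.headI ∧ (0 : Int) ∈ moduli.tail))
instance (moduli : List Int) (max_solutions : Int) : Decidable (Pre_enumerate_covering_systems moduli max_solutions) := by unfold Pre_enumerate_covering_systems; infer_instance

def pvWitness_enumerate_covering_systems : List Int × Int := ([2, 3, 6], 10)

def Spec_enumerate_covering_systems (moduli : List Int) (max_solutions : Int) (out : List (List (Int × Int))) : Prop := out = enumerate_covering_systems_alt moduli max_solutions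
instance (moduli : List Int) (max_solutions : Int) (out : List (List (Int × Int))) : Decidable (Spec_enumerate_covering_systems moduli max_solutions out) := by unfold Spec_enumerate_covering_systems; infer_instance

-- ===== CLAIM (what is proved, stated in full; the proofs are below) =====
def Claim_equal_enumerate_covering_systems : Prop := ∀ (moduli : List Int) (max_solutions : Int), Dom_enumerate_covering_systems moduli max_solutions → Pre_enumerate_covering_systems moduli max_solutions → Spec_enumerate_covering_systems moduli max_solutions (enumerate_covering_systems moduli max_solutions)


-- ===== LEMMAS AND PROOFS =====

-- ---- generic fold facts ----

-- a fold whose steps are all identities is the identity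
theorem pvFoldlId {α β : Type} (qs : List α) (f : β → α → β) (s : β)
    (h : ∀ q ∈ qs, ∀ acc, f acc q = acc) : qs.foldl f s = s := by
  rw [PySem.List.foldl_congr_mem _ _ (fun acc _ => acc) _ (fun acc x hx => h x hx acc)]
  exact PySem.List.foldl_ignore _ _

-- once the cap is reached, B's scan appends nothing
theorem pvStepB_stuck (L last maxs : Int) (qs : List (List (Int × Int)))
    (sols : List (List (Int × Int))) (h : PySem.List.len sols ≥ maxs) :
    qs.foldl (pvStepB L last maxs) sols = sols := by
  induction qs with
  | nil => rfl
  | cons q qs ih => rw [List.foldl_cons, pvStepB, if_pos h]; exact ih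

-- ---- the lcm loop: positivity and divisibility ----

theorem pvLcmStep (r v : Int) (hr : 0 < r) (hv : 0 < v) :
    0 < PySem.Int.floordiv (r * v) ((Int.gcd r v : Int)) ∧
    r ∣ PySem.Int.floordiv (r * v) ((Int.gcd r v : Int)) ∧
    v ∣ PySem.Int.floordiv (r * v) ((Int.gcd r v : Int)) := by
  have hg : 0 < ((Int.gcd r v : Int)) := by
    have : r.gcd v ≠ 0 := by simp [Int.gcd_eq_zero_iff]; omega
    positivity
  obtain ⟨r', hr'⟩ := Int.gcd_dvd_left r v
  obtain ⟨v', hv'⟩ := Int.gcd_dvd_right r v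
  have hfd : PySem.Int.floordiv (r * v) ((Int.gcd r v : Int)) = r' * v := by
    rw [PySem.Int.floordiv_eq_ediv_of_pos hg]
    calc (r * v) / ((Int.gcd r v : Int)) = ((Int.gcd r v : Int) * (r' * v)) / ((Int.gcd r v : Int)) := by
          rw [← mul_assoc, ← hr']
      _ = r' * v := Int.mul_ediv_cancel_left _ (ne_of_gt hg)
  rw [hfd]
  have hr'pos : 0 < r' := by nlinarith
  refine ⟨by positivity, ⟨v', ?_⟩, Dvd.intro_left r' rfl⟩
  calc r' * v = r' * ((Int.gcd r v : Int) * v') := by rw [← hv']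
    _ = ((Int.gcd r v : Int) * r') * v' := by ring
    _ = r * v' := by rw [← hr']

theorem pvLcmFold (vals : List Int) : ∀ r : Int, 0 < r → (∀ v ∈ vals, 0 < v) →
    0 < vals.foldl (fun r v => PySem.Int.floordiv (r * v) ((Int.gcd r v : Int))) r ∧
    r ∣ vals.foldl (fun r v => PySem.Int.floordiv (r * v) ((Int.gcd r v : Int))) r ∧
    ∀ v ∈ vals, v ∣ vals.foldl (fun r v => PySem.Int.floordiv (r * v) ((Int.gcd r v : Int))) r := by
  induction vals with
  | nil => intro r hr _; exact ⟨hr, dvd_refl r, by simp⟩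
  | cons v vs ih =>
      intro r hr h
      have hv : 0 < v := h v (by simp)
      obtain ⟨hpos, hrd, hvd⟩ := pvLcmStep r v hr hv
      obtain ⟨hpos', hsd', hdvd'⟩ := ih _ hpos (fun w hw => h w (by simp [hw]))
      simp only [List.foldl_cons]
      refine ⟨hpos', dvd_trans hrd hsd', ?_⟩
      intro w hw
      rcases List.mem_cons.1 hw with rfl | hmem
      · exact dvd_trans hvd hsd'
      · exact hdvd' w hmem

-- ---- counting: residue-class sizes and the capacity bound ----

-- the residue class {x in range(L) : x % m == a} has exactly L // m elements when m ∣ L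
theorem pvClassLen (L m a : Int) (hL : 0 ≤ L) (hm : 0 < m) (hd : m ∣ L) (ha : 0 ≤ a) (ham : a < m) :
    (((PySem.List.pyRange 0 L 1).filter (fun x => PySem.Int.mod x m == a)).length : Int)
      = PySem.Int.floordiv L m := by
  obtain ⟨k, hk⟩ := hd
  have hk0 : 0 ≤ k := by nlinarith
  have hfd : PySem.Int.floordiv L m = k := by
    rw [PySem.Int.floordiv_eq_ediv_of_pos hm, hk, Int.mul_ediv_cancel_left _ (ne_of_gt hm)]
  have hperm : ((PySem.List.pyRange 0 L 1).filter (fun x => PySem.Int.mod x m == a)).Perm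
      ((PySem.List.pyRange 0 k 1).map (fun j => a + m * j)) := by
    rw [List.perm_ext_iff_of_nodup (List.Nodup.filter _ (PySem.List.nodup_pyRange_one 0 L))
      ((PySem.List.nodup_pyRange_one 0 k).map (fun x y hxy => by
        have : m * x = m * y := by omega
        exact mul_left_cancel₀ (ne_of_gt hm) this))]
    intro y
    simp only [List.mem_filter, PySem.List.mem_pyRange_one, List.mem_map, beq_iff_eq]
    constructor
    · rintro ⟨⟨h0, hL'⟩, hmod⟩
      rw [PySem.Int.mod_eq_emod_of_pos hm] at hmod
      have hde : m * (y / m) + y % m = y := Int.mul_ediv_add_emod y m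
      refine ⟨y / m, ⟨Int.ediv_nonneg h0 (le_of_lt hm), ?_⟩, by omega⟩
      have h1 : m * (y / m) ≤ y := by omega
      have h2 : m * (y / m) < m * k := by omega
      exact lt_of_mul_lt_mul_left h2 (le_of_lt hm)
    · rintro ⟨j, ⟨hj0, hjk⟩, rfl⟩
      have hmj : 0 ≤ m * j := mul_nonneg (le_of_lt hm) hj0
      have hup : a + m * j < L := by nlinarith
      refine ⟨⟨by omega, hup⟩, ?_⟩
      rw [PySem.Int.mod_eq_emod_of_pos hm, Int.add_mul_emod_self_left]
      exact Int.emod_eq_of_lt ha ham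
  rw [hperm.length_eq, List.length_map, PySem.List.length_pyRange_one, hfd]
  omega

-- capacity bound: if the classes of `pairs` have total size below |U|, some x in U escapes them all
theorem pvCap (L : Int) (hL : 0 ≤ L) (pairs : List (Int × Int))
    (hp : ∀ am ∈ pairs, 0 < am.2 ∧ am.2 ∣ L ∧ 0 ≤ am.1 ∧ am.1 < am.2) :
    ∀ (U : List Int), U.Nodup → (∀ x ∈ U, x ∈ PySem.List.pyRange 0 L 1) →
    (pairs.map (fun am => PySem.Int.floordiv L am.2)).sum < (U.length : Int) →
    ∃ x ∈ U, ∀ am ∈ pairs, PySem.Int.mod x am.2 ≠ am.1 := by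
  induction pairs with
  | nil =>
      intro U hnd hsub hlt
      cases U with
      | nil => simp at hlt
      | cons u t => exact ⟨u, by simp, by simp⟩
  | cons am rest ih =>
      intro U hnd hsub hlt
      obtain ⟨hm, hd, ha, ham⟩ := hp am (by simp)
      have hsplit := List.length_eq_length_filter_add
        (l := U) (f := fun x => PySem.Int.mod x am.2 == am.1)
      have hclass : ((U.filter (fun x => PySem.Int.mod x am.2 == am.1)).length : Int)
          ≤ PySem.Int.floordiv L am.2 := by
        rw [← pvClassLen L am.2 am.1 hL hm hd ha ham]
        have hss : (U.filter (fun x => PySem.Int.mod x am.2 == am.1))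
            ⊆ ((PySem.List.pyRange 0 L 1).filter (fun x => PySem.Int.mod x am.2 == am.1)) := by
          intro x hx
          have := List.mem_filter.1 hx
          exact List.mem_filter.2 ⟨hsub x this.1, this.2⟩
        exact_mod_cast (List.subperm_of_subset (hnd.filter _) hss).length_le
      have hlt' : ((rest.map (fun am => PySem.Int.floordiv L am.2)).sum)
          < ((U.filter (fun x => !(PySem.Int.mod x am.2 == am.1))).length : Int) := by
        simp only [List.map_cons, List.sum_cons] at hlt
        omega
      obtain ⟨x, hxU', hxrest⟩ := ih (fun q hq => hp q (by simp [hq]))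
        (U.filter (fun x => !(PySem.Int.mod x am.2 == am.1))) (hnd.filter _)
        (fun x hx => hsub x (List.mem_filter.1 hx).1) hlt'
      have hxU := List.mem_filter.1 hxU'
      refine ⟨x, hxU.1, ?_⟩
      intro q hq
      rcases List.mem_cons.1 hq with rfl | hq'
      · simpa using hxU.2
      · exact hxrest q hq'

-- ---- structure of B's staged product list ----

-- proof-only view of the assignment stream: the same list built stage by stage, prefixes first
def pvExtend (ps : List (List (Int × Int))) (m : Int) : List (List (Int × Int)) :=
  ps.flatMap (fun p => (PySem.List.pyRange 0 m 1).map (fun a => p ++ [(a, m)]))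


theorem pvExtend_nil (m : Int) : pvExtend [] m = [] := rfl

theorem pvExtend_append (ps₁ ps₂ : List (List (Int × Int))) (m : Int) :
    pvExtend (ps₁ ++ ps₂) m = pvExtend ps₁ m ++ pvExtend ps₂ m := by
  simp [pvExtend]

theorem pvFoldlExtend_nil (fs : List Int) : fs.foldl pvExtend [] = [] := by
  induction fs with
  | nil => rfl
  | cons m fs ih => simpa [pvExtend_nil] using ih

theorem pvFoldlExtend_append (fs : List Int) :
    ∀ ps₁ ps₂, fs.foldl pvExtend (ps₁ ++ ps₂) = fs.foldl pvExtend ps₁ ++ fs.foldl pvExtend ps₂ := by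
  induction fs with
  | nil => intro ps₁ ps₂; rfl
  | cons m fs ih => intro ps₁ ps₂; simp only [List.foldl_cons, pvExtend_append]; exact ih _ _

theorem pvFoldlExtend_flatMap (fs : List Int) (ps : List (List (Int × Int))) :
    fs.foldl pvExtend ps = ps.flatMap (fun p => fs.foldl pvExtend [p]) := by
  induction ps with
  | nil => simp [pvFoldlExtend_nil]
  | cons p ps ih =>
      have : p :: ps = [p] ++ ps := rfl
      rw [this, pvFoldlExtend_append, List.flatMap_append, ih]
      simp

-- peeling one stage off the product
theorem pvFoldlExtend_cons (m : Int) (fs : List Int) (p : List (Int × Int)) :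
    (m :: fs).foldl pvExtend [p]
      = (PySem.List.pyRange 0 m 1).flatMap (fun a => fs.foldl pvExtend [p ++ [(a, m)]]) := by
  rw [List.foldl_cons]
  have h1 : pvExtend [p] m = (PySem.List.pyRange 0 m 1).map (fun a => p ++ [(a, m)]) := by
    simp [pvExtend]
  rw [h1, pvFoldlExtend_flatMap, List.flatMap_map]

-- the generator's yield list, stage by stage: appending a start p in front
theorem pvAssignments_map (fs : List Int) : ∀ p : List (Int × Int),
    (pvAssignments fs).map (fun q => p ++ q) = fs.foldl pvExtend [p] := by
  induction fs with
  | nil => intro p; simp [pvAssignments]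
  | cons m fs ih =>
      intro p
      rw [pvFoldlExtend_cons, pvAssignments, List.map_flatMap]
      apply List.flatMap_congr
      intro a _
      rw [← ih (p ++ [(a, m)]), List.map_map]
      apply List.map_congr_left
      intro rest _
      simp

theorem pvAssignments_eq (fs : List Int) : pvAssignments fs = fs.foldl pvExtend [[]] := by
  have h := pvAssignments_map fs []
  simpa using h

-- every member of the staged product is the start extended by in-range residues over fs
theorem pvMemFoldlExtend (fs : List Int) : ∀ (p q : List (Int × Int)),
    q ∈ fs.foldl pvExtend [p] →
    ∃ ext, q = p ++ ext ∧ ext.map Prod.snd = fs ∧ ∀ am ∈ ext, 0 ≤ am.1 ∧ am.1 < am.2 := by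
  induction fs with
  | nil =>
      intro p q hq
      simp only [List.foldl_nil, List.mem_singleton] at hq
      exact ⟨[], by simp [hq]⟩
  | cons m fs ih =>
      intro p q hq
      rw [pvFoldlExtend_cons] at hq
      obtain ⟨a, ha, hq'⟩ := List.mem_flatMap.1 hq
      obtain ⟨ext, rfl, hsnd, hbnd⟩ := ih _ _ hq'
      obtain ⟨h0a, ham⟩ := PySem.List.mem_pyRange_one.1 ha
      refine ⟨(a, m) :: ext, by simp, by simp [hsnd], ?_⟩
      intro am ham'
      rcases List.mem_cons.1 ham' with rfl | h
      · exact ⟨h0a, ham⟩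
      · exact hbnd am h

-- ---- leftover residues ----

theorem pvLeftover_nodup (L : Int) (p : List (Int × Int)) : (pvLeftover L p).Nodup :=
  List.Nodup.filter _ (PySem.List.nodup_pyRange_one 0 L)

theorem pvLeftover_subset (L : Int) (p : List (Int × Int)) :
    ∀ x ∈ pvLeftover L p, x ∈ PySem.List.pyRange 0 L 1 := by
  intro x hx; exact (List.mem_filter.1 hx).1

theorem pvLeftover_append (L : Int) (p q : List (Int × Int)) :
    pvLeftover L (p ++ q)
      = (pvLeftover L p).filter (fun x => q.all (fun am => !(PySem.Int.mod x am.2 == am.1))) := by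
  simp only [pvLeftover, List.all_append, List.filter_filter]
  exact List.filter_congr (fun x _ => by rw [Bool.and_comm])

-- a duplicate-free covered set inside range(L) has length L minus the uncovered count
theorem pvCoveredLen (L : Int) (hL : 0 ≤ L) (S : List Int) (hnd : S.Nodup)
    (hsub : ∀ x ∈ S, x ∈ PySem.List.pyRange 0 L 1) :
    (S.length : Int) =
      L - (((PySem.List.pyRange 0 L 1).filter (fun x => !(PySem.Set.contains S x))).length : Int) := by
  have hR : ((PySem.List.pyRange 0 L 1).length : Int) = L := by
    rw [PySem.List.length_pyRange_one]; omega
  have hsplit := List.length_eq_length_filter_add (l := PySem.List.pyRange 0 L 1)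
    (f := fun x => PySem.Set.contains S x)
  have hperm : ((PySem.List.pyRange 0 L 1).filter (fun x => PySem.Set.contains S x)).Perm S := by
    rw [List.perm_ext_iff_of_nodup (List.Nodup.filter _ (PySem.List.nodup_pyRange_one 0 L)) hnd]
    intro a
    simp only [List.mem_filter, PySem.Set.contains_iff]
    exact ⟨fun h => h.2, fun h => ⟨hsub a h, h⟩⟩
  have hlen := hperm.length_eq
  omega

-- ---- the merge union: membership and sortedness ----

theorem pvMergeAux_mem : ∀ (acc xs ys : List Int) (z : Int),
    z ∈ pvMergeAux acc xs ys ↔ z ∈ acc ∨ z ∈ xs ∨ z ∈ ys := by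
  intro acc xs ys
  induction acc, xs, ys using pvMergeAux.induct with
  | case1 acc ys => intro z; simp [pvMergeAux]
  | case2 acc xs h => intro z; cases xs <;> simp [pvMergeAux]
  | case3 acc x xs y ys hlt ih =>
      intro z
      rw [pvMergeAux, if_pos hlt]
      simp only [List.mem_cons, ih]
      tauto
  | case4 acc x xs y ys hlt hgt ih =>
      intro z
      rw [pvMergeAux, if_neg hlt, if_pos hgt]
      simp only [List.mem_cons, ih]
      tauto
  | case5 acc x xs y ys hlt hgt ih =>
      intro z
      have hxy : x = y := by omega
      subst hxy
      rw [pvMergeAux, if_neg hlt, if_neg hgt]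
      simp only [List.mem_cons, ih]
      tauto

theorem pvMerge_mem (xs ys : List Int) (z : Int) : z ∈ pvMerge xs ys ↔ z ∈ xs ∨ z ∈ ys := by
  rw [pvMerge, pvMergeAux_mem]
  simp

theorem pvMergeAux_pairwise : ∀ (acc xs ys : List Int),
    acc.Pairwise (· > ·) → xs.Pairwise (· < ·) → ys.Pairwise (· < ·) →
    (∀ a ∈ acc, ∀ z ∈ xs, a < z) → (∀ a ∈ acc, ∀ z ∈ ys, a < z) →
    (pvMergeAux acc xs ys).Pairwise (· < ·) := by
  intro acc xs ys
  induction acc, xs, ys using pvMergeAux.induct with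
  | case1 acc ys =>
      intro hacc _ hys _ hcross
      rw [pvMergeAux]
      rw [List.pairwise_append]
      refine ⟨List.pairwise_reverse.2 hacc, hys, ?_⟩
      intro a ha z hz
      exact hcross a (List.mem_reverse.1 ha) z hz
  | case2 acc xs h =>
      intro hacc hxs _ hcross _
      cases xs with
      | nil =>
          simp only [pvMergeAux]
          rw [List.pairwise_append]
          exact ⟨List.pairwise_reverse.2 hacc, by simp, by simp⟩
      | cons x t =>
          simp only [pvMergeAux]
          rw [List.pairwise_append]
          refine ⟨List.pairwise_reverse.2 hacc, hxs, ?_⟩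
          intro a ha z hz
          exact hcross a (List.mem_reverse.1 ha) z hz
  | case3 acc x xs y ys hlt ih =>
      intro hacc hxs hys hcx hcy
      rw [pvMergeAux, if_pos hlt]
      rw [List.pairwise_cons] at hxs
      apply ih
      · rw [List.pairwise_cons]
        exact ⟨fun a ha => hcx a ha x (by simp), hacc⟩
      · exact hxs.2
      · exact hys
      · intro a ha z hz
        rcases List.mem_cons.1 ha with rfl | ha
        · exact hxs.1 z hz
        · exact hcx a ha z (by simp [hz])
      · intro a ha z hz
        rcases List.mem_cons.1 ha with rfl | ha
        · rcases List.mem_cons.1 hz with rfl | hz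
          · exact hlt
          · have := (List.pairwise_cons.1 hys).1 z hz
            omega
        · exact hcy a ha z hz
  | case4 acc x xs y ys hlt hgt ih =>
      intro hacc hxs hys hcx hcy
      rw [pvMergeAux, if_neg hlt, if_pos hgt]
      rw [List.pairwise_cons] at hys
      apply ih
      · rw [List.pairwise_cons]
        exact ⟨fun a ha => hcy a ha y (by simp), hacc⟩
      · exact hxs
      · exact hys.2
      · intro a ha z hz
        rcases List.mem_cons.1 ha with rfl | ha
        · rcases List.mem_cons.1 hz with rfl | hz
          · exact hgt
          · have := (List.pairwise_cons.1 hxs).1 z hz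
            omega
        · exact hcx a ha z hz
      · intro a ha z hz
        rcases List.mem_cons.1 ha with rfl | ha
        · exact hys.1 z hz
        · exact hcy a ha z (by simp [hz])
  | case5 acc x xs y ys hlt hgt ih =>
      intro hacc hxs hys hcx hcy
      have hxy : x = y := by omega
      rw [pvMergeAux, if_neg hlt, if_neg hgt]
      rw [List.pairwise_cons] at hxs hys
      apply ih
      · rw [List.pairwise_cons]
        exact ⟨fun a ha => hcx a ha x (by simp), hacc⟩
      · exact hxs.2
      · exact hys.2
      · intro a ha z hz
        rcases List.mem_cons.1 ha with rfl | ha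
        · exact hxs.1 z hz
        · exact hcx a ha z (by simp [hz])
      · intro a ha z hz
        rcases List.mem_cons.1 ha with rfl | ha
        · have := hys.1 z hz
          omega
        · exact hcy a ha z (by simp [hz])

theorem pvMerge_pairwise (xs ys : List Int) (hx : xs.Pairwise (· < ·)) (hy : ys.Pairwise (· < ·)) :
    (pvMerge xs ys).Pairwise (· < ·) := by
  rw [pvMerge]
  exact pvMergeAux_pairwise [] xs ys (by simp) hx hy (by simp) (by simp)

-- ---- linking A's covered set to B's leftover list ----

-- the covered set A maintains along path p is the complement of pvLeftover L p in range(L)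
theorem pvComplement (L : Int) (p : List (Int × Int)) (S : PySem.Set Int)
    (hinv : ∀ x : Int, x ∈ S ↔ x ∈ PySem.List.pyRange 0 L 1 ∧ ∃ am ∈ p, PySem.Int.mod x am.2 = am.1) :
    (PySem.List.pyRange 0 L 1).filter (fun x => !(PySem.Set.contains S x)) = pvLeftover L p := by
  unfold pvLeftover
  apply List.filter_congr
  intro x hx
  have hc : PySem.Set.contains S x = p.any (fun am => PySem.Int.mod x am.2 == am.1) := by
    apply Bool.eq_iff_iff.mpr
    rw [PySem.Set.contains_iff, hinv x]
    simp [List.any_eq_true, hx]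
  rw [hc]
  apply Bool.eq_iff_iff.mpr
  simp [List.all_eq_true]

-- A's gap L - len(new_covered) counts exactly B's leftover residues
theorem pvGap (L : Int) (hL : 0 ≤ L) (p : List (Int × Int)) (S : PySem.Set Int) (hnd : S.Nodup)
    (hinv : ∀ x : Int, x ∈ S ↔ x ∈ PySem.List.pyRange 0 L 1 ∧ ∃ am ∈ p, PySem.Int.mod x am.2 = am.1) :
    L - PySem.Set.len S = ((pvLeftover L p).length : Int) := by
  have hsub : ∀ x ∈ S, x ∈ PySem.List.pyRange 0 L 1 := fun x hx => ((hinv x).1 hx).1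
  have h := pvCoveredLen L hL S hnd hsub
  rw [pvComplement L p S hinv] at h
  rw [PySem.Set.len]
  omega

-- unioning the class of (a, m) extends the invariant from p to p ++ [(a, m)]
theorem pvInvStep (L m a : Int) (p : List (Int × Int)) (S : PySem.Set Int)
    (hinv : ∀ x : Int, x ∈ S ↔ x ∈ PySem.List.pyRange 0 L 1 ∧ ∃ am ∈ p, PySem.Int.mod x am.2 = am.1) :
    ∀ x : Int, x ∈ pvMerge S
        ((PySem.List.pyRange 0 L 1).filter (fun x => PySem.Int.mod x m == a)) ↔
      x ∈ PySem.List.pyRange 0 L 1 ∧ ∃ am ∈ p ++ [(a, m)], PySem.Int.mod x am.2 = am.1 := by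
  intro x
  rw [pvMerge_mem, List.mem_filter, hinv x]
  simp only [List.mem_append, List.mem_singleton, beq_iff_eq]
  constructor
  · rintro (⟨hr, am, hmem, hmod⟩ | ⟨hr, hmod⟩)
    · exact ⟨hr, am, Or.inl hmem, hmod⟩
    · exact ⟨hr, (a, m), Or.inr rfl, hmod⟩
  · rintro ⟨hr, am, hmem | rfl, hmod⟩
    · exact Or.inl ⟨hr, am, hmem, hmod⟩
    · exact Or.inr ⟨hr, hmod⟩

-- ---- dead branches: a nonpositive modulus stops both programs ----

theorem pvFoldlFix {α β : Type} (l : List α) (f : β → α → β) (s : β)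
    (h : ∀ a ∈ l, f s a = s) : l.foldl f s = s := by
  induction l with
  | nil => rfl
  | cons a l ih =>
      rw [List.foldl_cons, h a (by simp)]
      exact ih (fun b hb => h b (by simp [hb]))

theorem pvBacktrackA_dead (L maxs : Int) : ∀ (ms : List Int), (∃ m ∈ ms, m ≤ 0) →
    ∀ current covered sols, pvBacktrackA L maxs ms current covered sols = sols := by
  intro ms
  induction ms with
  | nil => rintro ⟨m, hm, _⟩; simp at hm
  | cons m rest ih =>
      rintro hms current covered sols
      rw [pvBacktrackA]
      split
      · rfl
      · by_cases hm : m ≤ 0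
        · rw [PySem.List.pyRange_one_eq_nil hm]; rfl
        · have hrest : ∃ m' ∈ rest, m' ≤ 0 := by
            rcases hms with ⟨w, hw, hw0⟩
            rcases List.mem_cons.1 hw with h | h
            · exact absurd (h ▸ hw0) hm
            · exact ⟨w, h, hw0⟩
          rw [PySem.List.foldl_congr_mem _ _ (fun acc _ => acc) _
            (by intro acc x _; simp only; split
                · rfl
                · exact ih hrest _ _ _)]
          exact PySem.List.foldl_ignore _ _

-- ---- a filter over range with a unique satisfying value ----

theorem pvFilterRangeSingleton (hi r : Int) (hr : 0 ≤ r) (hrh : r < hi) (q : Int → Bool)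
    (hq : ∀ a, 0 ≤ a → a < hi → (q a = true ↔ a = r)) :
    (PySem.List.pyRange 0 hi 1).filter q = [r] := by
  rw [PySem.List.pyRange_one_append 0 r hi hr (le_of_lt hrh), PySem.List.pyRange_one_cons hrh]
  rw [List.filter_append, List.filter_cons]
  have h1 : (PySem.List.pyRange 0 r 1).filter q = [] := by
    rw [List.filter_eq_nil_iff]
    intro a ha
    obtain ⟨h0, hlt⟩ := PySem.List.mem_pyRange_one.1 ha
    intro hqa
    have := (hq a h0 (by omega)).1 hqa
    omega
  have h2 : (PySem.List.pyRange (r + 1) hi 1).filter q = [] := by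
    rw [List.filter_eq_nil_iff]
    intro a ha
    obtain ⟨h0, hlt⟩ := PySem.List.mem_pyRange_one.1 ha
    intro hqa
    have := (hq a (by omega) hlt).1 hqa
    omega
  have h3 : q r = true := (hq r hr hrh).2 rfl
  rw [h1, h2, h3]
  simp

-- ---- the last level: A's loop over the final modulus IS B's direct completion ----

theorem pvBase (L maxs last : Int) (hL : 0 < L) (hlast : 0 < last)
    (p : List (Int × Int)) (S : PySem.Set Int) (sols : List (List (Int × Int)))
    (hnd : S.Pairwise (· < ·))
    (hinv : ∀ x : Int, x ∈ S ↔ x ∈ PySem.List.pyRange 0 L 1 ∧ ∃ am ∈ p, PySem.Int.mod x am.2 = am.1) :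
    pvBacktrackA L maxs [last] p S sols = pvStepB L last maxs sols p := by
  rw [pvBacktrackA, pvStepB]
  by_cases hc : PySem.List.len sols ≥ maxs
  · rw [if_pos hc, if_pos hc]
  · rw [if_neg hc, if_neg hc, if_pos (show last ≥ 1 by omega)]
    rw [PySem.List.foldl_congr_mem _ _
      (fun acc a => if (pvLeftover L (p ++ [(a, last)])).isEmpty
        then acc ++ [p ++ [(a, last)]] else acc) _ ?hbody]
    case hbody =>
      intro acc a _
      simp only
      have hinv' := pvInvStep L last a p S hinv
      have hnd' : (pvMerge S ((PySem.List.pyRange 0 L 1).filter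
            (fun x => PySem.Int.mod x last == a))).Nodup :=
        (pvMerge_pairwise _ _ hnd
          ((PySem.List.pairwise_lt_pyRange_one 0 L).filter _)).imp (fun h => ne_of_lt h)
      have hgap := pvGap L (le_of_lt hL) (p ++ [(a, last)]) _ hnd' hinv'
      have hcap : (([] : List Int).foldl (fun s mj => s + PySem.Int.floordiv L mj) 0) = 0 := rfl
      rw [hcap, hgap]
      by_cases he : (pvLeftover L (p ++ [(a, last)])).isEmpty
      · have hlen : (pvLeftover L (p ++ [(a, last)])).length = 0 :=
          List.isEmpty_iff_length_eq_zero.1 he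
        rw [if_neg (by omega), if_pos he, pvBacktrackA]
        rw [PySem.Set.len] at hgap
        rw [if_pos (show PySem.Set.len (pvMerge S _) = L by
          rw [PySem.Set.len]; omega)]
      · have hlen : 0 < (pvLeftover L (p ++ [(a, last)])).length := by
          rcases Nat.eq_zero_or_pos (pvLeftover L (p ++ [(a, last)])).length with h0 | h0
          · exact absurd (List.isEmpty_iff_length_eq_zero.2 h0) he
          · exact h0
        rw [if_pos (by omega), if_neg he]
    rw [PySem.List.foldl_append_if]
    by_cases he : (pvLeftover L p).isEmpty
    · rw [if_pos he]
      have hnil : pvLeftover L p = [] := List.isEmpty_iff.1 he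
      have hfull : (PySem.List.pyRange 0 last 1).filter
          (fun a => (pvLeftover L (p ++ [(a, last)])).isEmpty) = PySem.List.pyRange 0 last 1 := by
        rw [List.filter_eq_self]
        intro a _
        rw [pvLeftover_append, hnil]
        rfl
      rw [hfull]
    · rw [if_neg he]
      obtain ⟨h, t, hlp⟩ : ∃ h t, pvLeftover L p = h :: t := by
        cases hhl : pvLeftover L p with
        | nil => rw [hhl] at he; simp at he
        | cons h t => exact ⟨h, t, rfl⟩
      have hhead : (pvLeftover L p).headD 0 = h := by rw [hlp]; rfl
      have hmemh : h ∈ pvLeftover L p := by rw [hlp]; simp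
      have hr0 : 0 ≤ PySem.Int.mod h last := PySem.Int.mod_nonneg h hlast
      have hr1 : PySem.Int.mod h last < last := PySem.Int.mod_lt h hlast
      -- (pvLeftover L (p ++ [(a, last)])).isEmpty ↔ every leftover x has x % last = a
      have hprednil : ∀ a : Int, (pvLeftover L (p ++ [(a, last)])).isEmpty = true ↔
          ∀ x ∈ pvLeftover L p, PySem.Int.mod x last = a := by
        intro a
        rw [pvLeftover_append, List.isEmpty_iff, List.filter_eq_nil_iff]
        constructor
        · intro hf x hx
          have := hf x hx
          simpa using this
        · intro hf x hx
          simp [hf x hx]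
      by_cases hall : (pvLeftover L p).all
          (fun x => PySem.Int.mod x last == PySem.Int.mod ((pvLeftover L p).headD 0) last) = true
      · rw [if_pos hall]
        rw [List.all_eq_true] at hall
        have hsingle : (PySem.List.pyRange 0 last 1).filter
            (fun a => (pvLeftover L (p ++ [(a, last)])).isEmpty) = [PySem.Int.mod h last] := by
          apply pvFilterRangeSingleton last (PySem.Int.mod h last) hr0 hr1
          intro a _ _
          rw [hprednil a]
          constructor
          · intro hf
            have := hf h hmemh
            omega
          · rintro rfl x hx
            have := hall x hx
            rw [hhead] at this
            exact beq_iff_eq.1 this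
        rw [hsingle, hhead]
        rfl
      · rw [if_neg hall]
        have hnone : (PySem.List.pyRange 0 last 1).filter
            (fun a => (pvLeftover L (p ++ [(a, last)])).isEmpty) = [] := by
          rw [List.filter_eq_nil_iff]
          intro a _ hpa
          apply hall
          rw [List.all_eq_true]
          intro x hx
          rw [hhead]
          have hfa := (hprednil a).1 hpa
          have hxa := hfa x hx
          have hha := hfa h hmemh
          rw [hxa, hha]
          exact beq_self_eq_true a
        rw [hnone]
        simp

-- ---- main correspondence: A's pruned DFS = B's flat scan of the staged product ----

theorem pvMain (L maxs last : Int) (hL : 0 < L) (hlast : 0 < last) (hld : last ∣ L) :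
    ∀ (fs : List Int), (∀ m ∈ fs, 0 < m ∧ m ∣ L) →
    ∀ (p : List (Int × Int)) (S : PySem.Set Int) (sols : List (List (Int × Int))),
    S.Pairwise (· < ·) →
    (∀ x : Int, x ∈ S ↔ x ∈ PySem.List.pyRange 0 L 1 ∧ ∃ am ∈ p, PySem.Int.mod x am.2 = am.1) →
    pvBacktrackA L maxs (fs ++ [last]) p S sols
      = (fs.foldl pvExtend [p]).foldl (pvStepB L last maxs) sols := by
  intro fs
  induction fs with
  | nil =>
      intro _ p S sols hnd hinv
      simpa using pvBase L maxs last hL hlast p S sols hnd hinv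
  | cons m fs ih =>
      intro hfs p S sols hnd hinv
      have hm : 0 < m := (hfs m (by simp)).1
      rw [List.cons_append, pvBacktrackA, pvFoldlExtend_cons, List.foldl_flatMap]
      by_cases hc : PySem.List.len sols ≥ maxs
      · rw [if_pos hc]
        symm
        apply pvFoldlFix
        intro a _
        exact pvStepB_stuck L last maxs _ sols hc
      · rw [if_neg hc]
        apply PySem.List.foldl_congr_mem
        intro acc a ha
        obtain ⟨ha0, ham⟩ := PySem.List.mem_pyRange_one.1 ha
        simp only
        have hinv' := pvInvStep L m a p S hinv
        have hsort' : (pvMerge S ((PySem.List.pyRange 0 L 1).filter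
              (fun x => PySem.Int.mod x m == a))).Pairwise (· < ·) :=
          pvMerge_pairwise _ _ hnd ((PySem.List.pairwise_lt_pyRange_one 0 L).filter _)
        have hnd' : (pvMerge S ((PySem.List.pyRange 0 L 1).filter
              (fun x => PySem.Int.mod x m == a))).Nodup := hsort'.imp (fun h => ne_of_lt h)
        have hgap := pvGap L (le_of_lt hL) (p ++ [(a, m)]) _ hnd' hinv'
        have hcap : (fs ++ [last]).foldl (fun s mj => s + PySem.Int.floordiv L mj) 0
            = (fs.map (fun mj => PySem.Int.floordiv L mj)).sum + PySem.Int.floordiv L last := by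
          rw [PySem.List.foldl_add]
          simp
        rw [hcap, hgap]
        have hfl1 : 1 ≤ PySem.Int.floordiv L last := by
          obtain ⟨k, hk⟩ := hld
          have hk0 : 0 < k := by nlinarith
          rw [PySem.Int.floordiv_eq_ediv_of_pos hlast, hk,
            Int.mul_ediv_cancel_left _ (ne_of_gt hlast)]
          omega
        by_cases hpr : (fs.map (fun mj => PySem.Int.floordiv L mj)).sum + PySem.Int.floordiv L last
            < ((pvLeftover L (p ++ [(a, m)])).length : Int)
        · rw [if_pos hpr]
          symm
          apply pvFoldlId
          intro q hq acc2
          obtain ⟨ext, rfl, hsnd, hbnd⟩ := pvMemFoldlExtend fs _ _ hq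
          have hpairs : ∀ am ∈ ext, 0 < am.2 ∧ am.2 ∣ L ∧ 0 ≤ am.1 ∧ am.1 < am.2 := by
            intro am hmem
            have h2 : am.2 ∈ fs := by
              rw [← hsnd]
              exact List.mem_map_of_mem hmem
            exact ⟨(hfs _ (by simp [h2])).1, (hfs _ (by simp [h2])).2,
              (hbnd am hmem).1, (hbnd am hmem).2⟩
          have hsum_ext : (ext.map (fun am => PySem.Int.floordiv L am.2)).sum
              = (fs.map (fun mj => PySem.Int.floordiv L mj)).sum := by
            rw [← hsnd, List.map_map]
            rfl
          rw [pvStepB]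
          split
          · rfl
          · rw [if_pos (show last ≥ 1 by omega)]
            by_cases hqe : (pvLeftover L (p ++ [(a, m)] ++ ext)).isEmpty
            · exfalso
              obtain ⟨x, hxU, hxesc⟩ := pvCap L (le_of_lt hL) ext hpairs
                (pvLeftover L (p ++ [(a, m)])) (pvLeftover_nodup _ _) (pvLeftover_subset _ _)
                (by omega)
              have hxq : x ∈ pvLeftover L (p ++ [(a, m)] ++ ext) := by
                rw [pvLeftover_append]
                refine List.mem_filter.2 ⟨hxU, ?_⟩
                rw [List.all_eq_true]
                intro am hmem
                simpa using hxesc am hmem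
              rw [List.isEmpty_iff] at hqe
              rw [hqe] at hxq
              simp at hxq
            · rw [if_neg hqe]
              by_cases hall : ((pvLeftover L (p ++ [(a, m)] ++ ext)).all
                  (fun x => PySem.Int.mod x last ==
                    PySem.Int.mod ((pvLeftover L (p ++ [(a, m)] ++ ext)).headD 0) last)) = true
              · exfalso
                set r := PySem.Int.mod ((pvLeftover L (p ++ [(a, m)] ++ ext)).headD 0) last with hr
                have hrpairs : ∀ am ∈ ext ++ [(r, last)],
                    0 < am.2 ∧ am.2 ∣ L ∧ 0 ≤ am.1 ∧ am.1 < am.2 := by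
                  intro am hmem
                  rcases List.mem_append.1 hmem with hmem | hmem
                  · exact hpairs am hmem
                  · rw [List.mem_singleton] at hmem
                    subst hmem
                    exact ⟨hlast, hld, PySem.Int.mod_nonneg _ hlast, PySem.Int.mod_lt _ hlast⟩
                obtain ⟨x, hxU, hxesc⟩ := pvCap L (le_of_lt hL) (ext ++ [(r, last)]) hrpairs
                  (pvLeftover L (p ++ [(a, m)])) (pvLeftover_nodup _ _) (pvLeftover_subset _ _)
                  (by rw [List.map_append, List.sum_append]; simpa [hsum_ext] using hpr)
                have hxq : x ∈ pvLeftover L (p ++ [(a, m)] ++ ext) := by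
                  rw [pvLeftover_append]
                  refine List.mem_filter.2 ⟨hxU, ?_⟩
                  rw [List.all_eq_true]
                  intro am hmem
                  simpa using hxesc am (List.mem_append_left _ hmem)
                have hxr : PySem.Int.mod x last ≠ r :=
                  hxesc (r, last) (List.mem_append_right _ (by simp))
                rw [List.all_eq_true] at hall
                exact hxr (beq_iff_eq.1 (hall x hxq))
              · rw [if_neg hall]
        · rw [if_neg hpr]
          exact ih (fun m' hm' => hfs m' (by simp [hm'])) (p ++ [(a, m)]) _ acc hsort' hinv'

-- if the classes of all moduli cannot cover range(L), B's scan appends nothing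
theorem pvNoDensity (L maxs last : Int) (hL : 0 < L) (hlast : 0 < last) (hld : last ∣ L)
    (fs : List Int) (hfs : ∀ m ∈ fs, 0 < m ∧ m ∣ L)
    (hden : (fs.map (fun m => PySem.Int.floordiv L m)).sum + PySem.Int.floordiv L last < L) :
    (fs.foldl pvExtend [[]]).foldl (pvStepB L last maxs) [] = [] := by
  apply pvFoldlId
  intro q hq acc
  obtain ⟨ext, hqe, hsnd, hbnd⟩ := pvMemFoldlExtend fs [] q hq
  rw [List.nil_append] at hqe
  subst hqe
  have hpairs : ∀ am ∈ q, 0 < am.2 ∧ am.2 ∣ L ∧ 0 ≤ am.1 ∧ am.1 < am.2 := by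
    intro am hmem
    have h2 : am.2 ∈ fs := by
      rw [← hsnd]
      exact List.mem_map_of_mem hmem
    exact ⟨(hfs _ h2).1, (hfs _ h2).2, (hbnd am hmem).1, (hbnd am hmem).2⟩
  have hsum_ext : (q.map (fun am => PySem.Int.floordiv L am.2)).sum
      = (fs.map (fun m => PySem.Int.floordiv L m)).sum := by
    rw [← hsnd, List.map_map]
    rfl
  have hUlen : ((PySem.List.pyRange 0 L 1).length : Int) = L := by
    rw [PySem.List.length_pyRange_one]
    omega
  have hmemq : ∀ x : Int, x ∈ PySem.List.pyRange 0 L 1 →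
      (∀ am ∈ q, PySem.Int.mod x am.2 ≠ am.1) → x ∈ pvLeftover L q := by
    intro x hx hesc
    refine List.mem_filter.2 ⟨hx, ?_⟩
    rw [List.all_eq_true]
    intro am hmem
    simpa using hesc am hmem
  rw [pvStepB]
  split
  · rfl
  · rw [if_pos (show last ≥ 1 by omega)]
    by_cases hqe : (pvLeftover L q).isEmpty
    · exfalso
      obtain ⟨x, hxU, hxesc⟩ := pvCap L (le_of_lt hL) q hpairs
        (PySem.List.pyRange 0 L 1) (PySem.List.nodup_pyRange_one 0 L) (fun x hx => hx)
        (by rw [hUlen, hsum_ext]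
            have h1 : 1 ≤ PySem.Int.floordiv L last := by
              obtain ⟨k, hk⟩ := hld
              have hk0 : 0 < k := by nlinarith
              rw [PySem.Int.floordiv_eq_ediv_of_pos hlast, hk,
                Int.mul_ediv_cancel_left _ (ne_of_gt hlast)]
              omega
            omega)
      rw [List.isEmpty_iff] at hqe
      have := hmemq x hxU hxesc
      rw [hqe] at this
      simp at this
    · rw [if_neg hqe]
      by_cases hall : ((pvLeftover L q).all
          (fun x => PySem.Int.mod x last ==
            PySem.Int.mod ((pvLeftover L q).headD 0) last)) = true
      · exfalso
        set r := PySem.Int.mod ((pvLeftover L q).headD 0) last with hr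
        have hrpairs : ∀ am ∈ q ++ [(r, last)],
            0 < am.2 ∧ am.2 ∣ L ∧ 0 ≤ am.1 ∧ am.1 < am.2 := by
          intro am hmem
          rcases List.mem_append.1 hmem with hmem | hmem
          · exact hpairs am hmem
          · rw [List.mem_singleton] at hmem
            subst hmem
            exact ⟨hlast, hld, PySem.Int.mod_nonneg _ hlast, PySem.Int.mod_lt _ hlast⟩
        obtain ⟨x, hxU, hxesc⟩ := pvCap L (le_of_lt hL) (q ++ [(r, last)]) hrpairs
          (PySem.List.pyRange 0 L 1) (PySem.List.nodup_pyRange_one 0 L) (fun x hx => hx)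
          (by rw [List.map_append, List.sum_append, hUlen, hsum_ext]
              simpa using hden)
        have hxq : x ∈ pvLeftover L q :=
          hmemq x hxU (fun am hmem => hxesc am (List.mem_append_left _ hmem))
        have hxr : PySem.Int.mod x last ≠ r :=
          hxesc (r, last) (List.mem_append_right _ (by simp))
        rw [List.all_eq_true] at hall
        exact hxr (beq_iff_eq.1 (hall x hxq))
      · rw [if_neg hall]

-- ===== VERDICT (by name: the statement is the Claim_ definition above) =====
theorem enumerate_covering_systems_spec : Claim_equal_enumerate_covering_systems := by
  intro moduli maxs _hdom _hpre
  unfold Spec_enumerate_covering_systems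
  unfold enumerate_covering_systems enumerate_covering_systems_alt
  by_cases hnil : moduli = []
  · simp [hnil]
  · simp only [if_neg hnil]
    have hLdef : pvLcmList moduli
        = moduli.foldl (fun l v => PySem.Int.floordiv (l * v) ((Int.gcd l v : Int))) 1 := rfl
    have hlastD : moduli.getLastD 0 = moduli.getLast hnil := by
      cases moduli with
      | nil => exact absurd rfl hnil
      | cons m t => simp [List.getLastD_eq_getLast?, List.getLast?_eq_some_getLast]
    have hdecomp : moduli.dropLast ++ [moduli.getLast hnil] = moduli :=
      List.dropLast_append_getLast hnil
    by_cases hmax : maxs ≤ 0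
    case pos =>
      rw [if_pos hmax]
      obtain ⟨m, t, rfl⟩ := List.exists_cons_of_ne_nil hnil
      rw [pvBacktrackA, if_pos (by rw [PySem.List.len_eq]; simpa using hmax)]
    case neg =>
    rw [if_neg hmax]
    by_cases hpos : ∀ m ∈ moduli, 0 < m
    · have hnoneg : (moduli.any (fun m => decide (m ≤ 0))) = false := by
        simp only [List.any_eq_false, decide_eq_true_eq]
        intro m hm
        have := hpos m hm
        omega
      rw [if_neg (by simp [hnoneg])]
      obtain ⟨hLpos, _, hdvd⟩ := pvLcmFold moduli 1 one_pos hpos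
      have hlast_mem : moduli.getLast hnil ∈ moduli := List.getLast_mem hnil
      rw [← hLdef, hlastD]
      set LL := pvLcmList moduli with hLL
      have hmainA : pvBacktrackA LL maxs moduli [] PySem.Set.empty []
          = (moduli.dropLast.foldl pvExtend [[]]).foldl
              (pvStepB LL (moduli.getLast hnil) maxs) [] := by
        conv_lhs => rw [← hdecomp]
        exact pvMain LL maxs (moduli.getLast hnil) hLpos
          (hpos _ hlast_mem) (hdvd _ hlast_mem) moduli.dropLast
          (fun m hm => ⟨hpos m (List.dropLast_subset _ hm), hdvd m (List.dropLast_subset _ hm)⟩)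
          [] PySem.Set.empty [] (by simp [PySem.Set.empty])
          (by intro x; simp [PySem.Set.empty])
      rw [hmainA, pvAssignments_eq]
      by_cases hden : (moduli.map (fun m => PySem.Int.floordiv LL m)).sum < LL
      · rw [if_pos hden]
        apply pvNoDensity LL maxs (moduli.getLast hnil) hLpos
          (hpos _ hlast_mem) (hdvd _ hlast_mem) moduli.dropLast
          (fun m hm => ⟨hpos m (List.dropLast_subset _ hm), hdvd m (List.dropLast_subset _ hm)⟩)
        have hsum : (moduli.map (fun m => PySem.Int.floordiv LL m)).sum
            = (moduli.dropLast.map (fun m => PySem.Int.floordiv LL m)).sum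
              + PySem.Int.floordiv LL (moduli.getLast hnil) := by
          conv_lhs => rw [← hdecomp]
          rw [List.map_append, List.sum_append]
          simp
        omega
      · rw [if_neg hden]
    · have hsome : (moduli.any (fun m => decide (m ≤ 0))) = true := by
        simp only [List.any_eq_true, decide_eq_true_eq]
        simp only [not_forall, not_lt] at hpos
        obtain ⟨m, hm, hm0⟩ := hpos
        exact ⟨m, hm, hm0⟩
      rw [if_pos (by simp [hsome])]
      apply pvBacktrackA_dead
      simp only [not_forall, not_lt] at hpos
      obtain ⟨m, hm, hm0⟩ := hpos
      exact ⟨m, hm, hm0⟩
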